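-- pv_equiv track=rewrite | github.com/OviYaD/hackerrank | CrossWordPuzzle.py | make_sets
-- ===== SOURCE A (Python) =====
-- def make_sets(cs):
--     rows = len(cs)
--     cols = len(cs[0])
--     out_sets = set()
--     visited = set()
--     for sr in range(rows):
--         for sc in range(cols):
--             if cs[sr][sc] != "-": continue
--             if sc==0 or cs[sr][sc-1] != "-":
--                 # right
--                 c = sc
--                 while c < cols and cs[sr][c] == "-":
--                     visited.add( (sr,c) )
--                     c += 1
--                 if c-1 > sc: out_sets.add( ((sr,sc), c-sc, (0,1)) )
--             if sr==0 or cs[sr-1][sc] != "-":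
--                 # down
--                 r = sr
--                 while r < rows and cs[r][sc] == "-":
--                     visited.add( (r,sc) )
--                     r += 1
--                 if r-1 > sr: out_sets.add( ((sr,sc), r-sr, (1,0)) )
--     return out_sets
-- ===== SOURCE B (Python) =====
-- def make_sets(cs):
--     rows = len(cs)
--     cols = len(cs[0])
--     # suffix run-length tables: hlen[r][c] = length of the '-'-run starting at (r,c)
--     # going right (within the first cols columns); vcols[c][r] = same going down.
--     hlen = []
--     for r in range(rows):
--         row = [0] * (cols + 1)
--         for c in range(cols - 1, -1, -1):
--             row[c] = row[c + 1] + 1 if cs[r][c] == '-' else 0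
--         hlen.append(row)
--     vcols = []
--     for c in range(cols):
--         col = [0] * (rows + 1)
--         for r in range(rows - 1, -1, -1):
--             col[r] = col[r + 1] + 1 if cs[r][c] == '-' else 0
--         vcols.append(col)
--     out = set()
--     for r in range(rows):
--         for c in range(cols):
--             if cs[r][c] != '-':
--                 continue
--             if (c == 0 or cs[r][c - 1] != '-') and hlen[r][c] >= 2:
--                 out.add(((r, c), hlen[r][c], (0, 1)))
--             if (r == 0 or cs[r - 1][c] != '-') and vcols[c][r] >= 2:
--                 out.add(((r, c), vcols[c][r], (1, 0)))
--     return out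
-- ===== Notes on version B (the rewrite author's own statement) =====
-- stated objective: alternative
-- what changed: B precomputes suffix run-length tables for every row and column (filled right-to-left / bottom-to-top) and the main scan emits a slot by table lookup, instead of A's nested while-loops re-walking each run to measure it; the unused 'visited' set is dropped.
import Mathlib
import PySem

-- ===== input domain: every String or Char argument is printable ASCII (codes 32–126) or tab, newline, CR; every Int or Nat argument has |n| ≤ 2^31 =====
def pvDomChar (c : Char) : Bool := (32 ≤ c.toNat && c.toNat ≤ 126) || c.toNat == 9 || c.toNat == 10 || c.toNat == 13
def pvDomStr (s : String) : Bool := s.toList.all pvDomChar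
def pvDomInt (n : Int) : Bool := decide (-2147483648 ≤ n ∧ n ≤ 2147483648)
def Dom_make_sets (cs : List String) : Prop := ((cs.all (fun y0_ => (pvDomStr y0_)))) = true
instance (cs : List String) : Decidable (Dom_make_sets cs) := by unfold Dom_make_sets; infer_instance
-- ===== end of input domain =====

-- B replaces A's in-loop while-rescans by precomputed suffix run-length tables (alternative
-- decomposition, same asymptotic cost). Return value only; A's write-only 'visited' set is omitted.

-- ===== PORT A =====
-- cs[r][c] (indices known in range under Pre_; default ' ' is never '-')
def pyCell (cs : List String) (r c : Nat) : Char := ((cs.getD r "").toList.getD c ' ')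

-- 'while c < cols and cs[sr][c] == "-": c += 1' (final value of c)
def runRight (cs : List String) (cols r c : Nat) : Nat :=
  if _h : c < cols then
    (if pyCell cs r c = '-' then runRight cs cols r (c + 1) else c)
  else c
termination_by cols - c

-- 'while r < rows and cs[r][sc] == "-": r += 1' (final value of r)
def runDown (cs : List String) (rows r c : Nat) : Nat :=
  if _h : r < rows then
    (if pyCell cs r c = '-' then runDown cs rows (r + 1) c else r)
  else r
termination_by rows - r

def make_sets (cs : List String) : List ((Int × Int) × Int × (Int × Int)) :=
  let rows := cs.length
  let cols := (cs.headD "").toList.length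
  (List.range rows).foldl (fun out sr =>
    (List.range cols).foldl (fun out sc =>
      if pyCell cs sr sc ≠ '-' then out else
      let out :=
        if sc = 0 ∨ pyCell cs sr (sc - 1) ≠ '-' then
          let c := runRight cs cols sr sc
          if sc + 1 < c then
            PySem.Set.add out (((sr : Int), (sc : Int)), ((c : Int) - (sc : Int)), ((0 : Int), (1 : Int)))
          else out
        else out
      if sr = 0 ∨ pyCell cs (sr - 1) sc ≠ '-' then
        let r := runDown cs rows sr sc
        if sr + 1 < r then
          PySem.Set.add out (((sr : Int), (sc : Int)), ((r : Int) - (sr : Int)), ((1 : Int), (0 : Int)))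
        else out
      else out) out) []

-- ===== PORT B =====
-- the backwards fill 'row[c] = row[c+1] + 1 if ch == "-" else 0': suffix run lengths of a line
def runsFrom : List Char → List Nat
  | [] => [0]
  | ch :: t =>
    let rest := runsFrom t
    (if ch = '-' then rest.headD 0 + 1 else 0) :: rest

def make_sets_alt (cs : List String) : List ((Int × Int) × Int × (Int × Int)) :=
  let rows := cs.length
  let cols := (cs.headD "").toList.length
  let hlen := (List.range rows).map (fun r => runsFrom (((cs.getD r "").toList).take cols))
  let vcols := (List.range cols).map (fun c => runsFrom ((List.range rows).map (fun r => pyCell cs r c)))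
  (List.range rows).foldl (fun out r =>
    (List.range cols).foldl (fun out c =>
      if pyCell cs r c ≠ '-' then out else
      let h := (hlen.getD r []).getD c 0
      let v := (vcols.getD c []).getD r 0
      let out :=
        if (c = 0 ∨ pyCell cs r (c - 1) ≠ '-') ∧ 2 ≤ h then
          PySem.Set.add out (((r : Int), (c : Int)), (h : Int), ((0 : Int), (1 : Int)))
        else out
      if (r = 0 ∨ pyCell cs (r - 1) c ≠ '-') ∧ 2 ≤ v then
        PySem.Set.add out (((r : Int), (c : Int)), (v : Int), ((1 : Int), (0 : Int)))
      else out) out) []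

-- ===== PRECONDITION & SPEC =====
-- Pre_ excludes exactly the inputs where Python A raises IndexError: the empty grid
-- (cs[0]) and ragged grids with a row shorter than the first row (cs[r][c], c < cols).
def Pre_make_sets (cs : List String) : Prop :=
  cs ≠ [] ∧ ∀ s ∈ cs, (cs.headD "").length ≤ s.length
instance (cs : List String) : Decidable (Pre_make_sets cs) := by unfold Pre_make_sets; infer_instance

def pvWitness_make_sets : List String := ["--a", "-b-", "-c-"]

def Spec_make_sets (cs : List String) (out : List ((Int × Int) × Int × (Int × Int))) : Prop := out = make_sets_alt cs
instance (cs : List String) (out : List ((Int × Int) × Int × (Int × Int))) : Decidable (Spec_make_sets cs out) := by unfold Spec_make_sets; infer_instance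

-- ===== CLAIM (what is proved, stated in full; the proofs are below) =====
def Claim_equal_make_sets : Prop := ∀ (cs : List String), Dom_make_sets cs → Pre_make_sets cs → Spec_make_sets cs (make_sets cs)

-- ===== LEMMAS AND PROOFS =====

theorem runsFrom_getD (l : List Char) (c : Nat) :
    (runsFrom l).getD c 0 =
      if c < l.length ∧ l.getD c ' ' = '-' then (runsFrom l).getD (c + 1) 0 + 1 else 0 := by
  induction l generalizing c with
  | nil => simp [runsFrom]
  | cons ch t ih =>
    cases c with
    | zero =>
      simp only [runsFrom, List.getD_cons_zero, List.length_cons, List.getD_cons_succ]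
      by_cases h : ch = '-'
      · cases runsFrom t <;> simp [h]
      · simp [h]
    | succ c =>
      simp only [runsFrom, List.getD_cons_succ, List.length_cons, Nat.succ_lt_succ_iff]
      exact ih c

theorem runsFrom_getD_big (l : List Char) (c : Nat) (h : l.length ≤ c) :
    (runsFrom l).getD c 0 = 0 := by
  rw [runsFrom_getD, if_neg]
  rintro ⟨h1, _⟩; omega

theorem getD_take (l : List Char) (k c : Nat) (d : Char) (h : c < k) :
    (l.take k).getD c d = l.getD c d := by
  simp [List.getD_eq_getElem?_getD, List.getElem?_take_of_lt h]

theorem getD_map_range_char (n r : Nat) (f : Nat → Char) (h : r < n) :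
    ((List.range n).map f).getD r ' ' = f r := by
  rw [List.getD_eq_getElem?_getD]
  simp [h]

theorem runRight_eq (cs : List String) (cols r : Nat) : ∀ (n c : Nat), cols - c ≤ n →
    runRight cs cols r c = c + (runsFrom (((cs.getD r "").toList).take cols)).getD c 0 := by
  intro n
  induction n with
  | zero =>
    intro c hc
    rw [runRight, dif_neg (by omega : ¬ c < cols),
        runsFrom_getD_big _ _ (by rw [List.length_take]; omega), Nat.add_zero]
  | succ n ih =>
    intro c hc
    by_cases hlt : c < cols
    · rw [runRight, dif_pos hlt]
      by_cases hch : pyCell cs r c = '-'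
      · have hcl : c < (cs.getD r "").toList.length := by
          by_contra hno
          have hd : ((cs.getD r "").toList).getD c ' ' = ' ' :=
            List.getD_eq_default _ _ (by omega)
          unfold pyCell at hch
          rw [hd] at hch
          exact absurd hch (by decide)
        rw [if_pos hch, runsFrom_getD, if_pos
            ⟨by rw [List.length_take]; omega, by rw [getD_take _ _ _ _ hlt]; exact hch⟩,
          ih (c + 1) (by omega)]
        omega
      · rw [if_neg hch, runsFrom_getD, if_neg, Nat.add_zero]
        rintro ⟨h1, h2⟩
        rw [getD_take _ _ _ _ hlt] at h2
        exact hch h2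
    · rw [runRight, dif_neg hlt,
        runsFrom_getD_big _ _ (by rw [List.length_take]; omega), Nat.add_zero]

theorem runDown_eq (cs : List String) (rows c : Nat) : ∀ (n r : Nat), rows - r ≤ n →
    runDown cs rows r c = r + (runsFrom ((List.range rows).map (fun i => pyCell cs i c))).getD r 0 := by
  intro n
  induction n with
  | zero =>
    intro r hr
    rw [runDown, dif_neg (by omega : ¬ r < rows),
        runsFrom_getD_big _ _ (by rw [List.length_map, List.length_range]; omega), Nat.add_zero]
  | succ n ih =>
    intro r hr
    by_cases hlt : r < rows
    · rw [runDown, dif_pos hlt]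
      by_cases hch : pyCell cs r c = '-'
      · rw [if_pos hch, runsFrom_getD, if_pos
            ⟨by rw [List.length_map, List.length_range]; omega,
             by rw [getD_map_range_char _ _ _ hlt]; exact hch⟩,
          ih (r + 1) (by omega)]
        omega
      · rw [if_neg hch, runsFrom_getD, if_neg, Nat.add_zero]
        rintro ⟨h1, h2⟩
        rw [getD_map_range_char _ _ _ hlt] at h2
        exact hch h2
    · rw [runDown, dif_neg hlt,
        runsFrom_getD_big _ _ (by rw [List.length_map, List.length_range]; omega), Nat.add_zero]

theorem hlen_lookup (cs : List String) (rows cols r : Nat) (hr : r < rows) :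
    (((List.range rows).map (fun i => runsFrom (((cs.getD i "").toList).take cols))).getD r []) =
      runsFrom (((cs.getD r "").toList).take cols) := by
  rw [List.getD_eq_getElem?_getD]
  simp [hr]

theorem vcols_lookup (cs : List String) (rows cols c : Nat) (hc : c < cols) :
    (((List.range cols).map (fun j => runsFrom ((List.range rows).map (fun i => pyCell cs i j)))).getD c []) =
      runsFrom ((List.range rows).map (fun i => pyCell cs i c)) := by
  rw [List.getD_eq_getElem?_getD]
  simp [hc]

theorem make_sets_eq_alt (cs : List String) : make_sets cs = make_sets_alt cs := by
  unfold make_sets make_sets_alt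
  apply PySem.List.foldl_congr_mem
  intro out sr hsr
  have hsr' : sr < cs.length := List.mem_range.mp hsr
  apply PySem.List.foldl_congr_mem
  intro out sc hsc
  have hsc' : sc < (cs.headD "").toList.length := List.mem_range.mp hsc
  by_cases hdash : pyCell cs sr sc = '-'
  · simp only [hdash, ne_eq, not_true_eq_false, if_false]
    rw [hlen_lookup cs cs.length (cs.headD "").toList.length sr hsr',
        vcols_lookup cs cs.length (cs.headD "").toList.length sc hsc']
    set h := (runsFrom (((cs.getD sr "").toList).take (cs.headD "").toList.length)).getD sc 0 with hh
    set v := (runsFrom ((List.range cs.length).map (fun i => pyCell cs i sc))).getD sr 0 with hv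
    have hr := runRight_eq cs (cs.headD "").toList.length sr ((cs.headD "").toList.length) sc (Nat.sub_le _ _)
    have hd := runDown_eq cs cs.length sc cs.length sr (Nat.sub_le _ _)
    rw [← hh] at hr
    rw [← hv] at hd
    rw [hr, hd]
    have e1 : ((sc + h : Nat) : Int) - (sc : Int) = (h : Int) := by push_cast; ring
    have e2 : ((sr + v : Nat) : Int) - (sr : Int) = (v : Int) := by push_cast; ring
    rw [e1, e2]
    by_cases bH : sc = 0 ∨ pyCell cs sr (sc - 1) ≠ '-' <;>
      by_cases bV : sr = 0 ∨ pyCell cs (sr - 1) sc ≠ '-' <;>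
        simp only [bH, bV, if_true, if_false, true_and, false_and] <;>
          split_ifs <;> first | rfl | omega
  · simp [hdash]

-- ===== VERDICT (by name: the statement is the Claim_ definition above) =====
theorem make_sets_spec : Claim_equal_make_sets := by
  intro cs _ _
  unfold Spec_make_sets
  exact make_sets_eq_alt cs
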